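-- pv_equiv track=rewrite | github.com/gsw2019/video-game-puzzles | vespers_host_catalyst_codes/src/access_override_puzzles_solver.py | sum_four_digits
-- ===== SOURCE A (Python) =====
-- def sum_four_digits(target):
--     """Determines if target can be the sum of four unique digits (1-9)
--
--     :param target:  (int) target value
--     :return:        (str) string of four unique digits if possible, empty
--                     string otherwise
--     """
--     for a in range(1, 7):
--         for b in range(a+1, 8):
--             for c in range(b+1, 9):
--                 for d in range(c+1, 10):
--                     if a + b + c + d == target:
--                         return f"{a}, {b}, {c}, {d}"
--
--     return ""
-- ===== SOURCE B (Python) =====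
-- def sum_four_digits(target):
--     """Determines if target can be the sum of four unique digits (1-9)
--
--     Greedy closed-form construction of the lexicographically smallest
--     quadruple instead of four nested loops.
--     """
--     if target < 10 or target > 30:
--         return ""
--     digits = []
--     lo, r = 0, target
--     for k in (3, 2, 1, 0):
--         # max sum achievable by k distinct digits all <= 9
--         maxrest = 9 * k - k * (k - 1) // 2
--         d = max(lo + 1, r - maxrest)
--         digits.append(d)
--         lo, r = d, r - d
--     return ", ".join(str(x) for x in digits)
-- ===== Notes on version B (the rewrite author's own statement) =====
-- stated objective: alternative
-- what changed: Replaced the four nested search loops by a loop-free greedy construction: each digit is computed in closed form as the smallest choice that leaves the residual reachable by the remaining positions.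
import Mathlib
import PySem

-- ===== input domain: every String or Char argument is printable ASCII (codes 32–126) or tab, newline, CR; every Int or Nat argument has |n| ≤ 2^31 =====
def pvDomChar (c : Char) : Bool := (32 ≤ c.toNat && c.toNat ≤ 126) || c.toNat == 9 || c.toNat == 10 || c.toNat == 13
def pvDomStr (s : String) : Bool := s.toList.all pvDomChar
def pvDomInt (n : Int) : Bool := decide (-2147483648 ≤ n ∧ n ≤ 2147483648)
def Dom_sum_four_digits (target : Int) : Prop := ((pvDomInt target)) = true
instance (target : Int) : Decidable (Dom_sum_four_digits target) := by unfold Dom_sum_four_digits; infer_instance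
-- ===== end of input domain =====

-- B replaces A's four nested search loops by a closed-form greedy construction of each digit.

-- ===== PORT A =====
-- f"{a}, {b}, {c}, {d}"
def pvFmt (a b c d : Int) : String :=
  PySem.Str.join ", " [PySem.Int.toStr a, PySem.Int.toStr b, PySem.Int.toStr c, PySem.Int.toStr d]

def pvLoopD (t a b c : Int) : List Int → Option String
  | [] => none
  | d :: ds => if a + b + c + d = t then some (pvFmt a b c d) else pvLoopD t a b c ds

def pvLoopC (t a b : Int) : List Int → Option String
  | [] => none
  | c :: cs =>
    match pvLoopD t a b c (PySem.List.pyRange (c + 1) 10 1) with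
    | some s => some s
    | none => pvLoopC t a b cs

def pvLoopB (t a : Int) : List Int → Option String
  | [] => none
  | b :: bs =>
    match pvLoopC t a b (PySem.List.pyRange (b + 1) 9 1) with
    | some s => some s
    | none => pvLoopB t a bs

def pvLoopA (t : Int) : List Int → Option String
  | [] => none
  | a :: as_ =>
    match pvLoopB t a (PySem.List.pyRange (a + 1) 8 1) with
    | some s => some s
    | none => pvLoopA t as_

def sum_four_digits (target : Int) : String :=
  (pvLoopA target (PySem.List.pyRange 1 7 1)).getD ""

-- ===== PORT B =====
-- one greedy step: state = (digits so far, last digit picked, residual sum)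
def pvPick (st : List Int × Int × Int) (k : Int) : List Int × Int × Int :=
  let digits := st.1
  let lo := st.2.1
  let r := st.2.2
  let maxrest := 9 * k - PySem.Int.floordiv (k * (k - 1)) 2
  let d := max (lo + 1) (r - maxrest)
  (digits ++ [d], d, r - d)

def sum_four_digits_alt (target : Int) : String :=
  if target < 10 ∨ target > 30 then ""
  else
    let st := [(3 : Int), 2, 1, 0].foldl pvPick ([], 0, target)
    PySem.Str.join ", " (st.1.map PySem.Int.toStr)

-- ===== PRECONDITION & SPEC =====
def Spec_sum_four_digits (target : Int) (out : String) : Prop := out = sum_four_digits_alt target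
instance (target : Int) (out : String) : Decidable (Spec_sum_four_digits target out) := by unfold Spec_sum_four_digits; infer_instance

-- ===== CLAIM (what is proved, stated in full; the proofs are below) =====
def Claim_equal_sum_four_digits : Prop := ∀ (target : Int), Dom_sum_four_digits target → Spec_sum_four_digits target (sum_four_digits target)

-- ===== LEMMAS AND PROOFS =====

lemma pvLoopD_none (t a b c : Int) (ds : List Int)
    (h : ∀ d ∈ ds, a + b + c + d ≠ t) : pvLoopD t a b c ds = none := by
  induction ds with
  | nil => rfl
  | cons d ds ih =>
    simp only [pvLoopD]
    rw [if_neg (h d (List.mem_cons_self))]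
    exact ih fun x hx => h x (List.mem_cons_of_mem _ hx)

lemma pvLoopC_none (t a b : Int) (cs : List Int)
    (h : ∀ c ∈ cs, ∀ d, c + 1 ≤ d → d < 10 → a + b + c + d ≠ t) :
    pvLoopC t a b cs = none := by
  induction cs with
  | nil => rfl
  | cons c cs ih =>
    simp only [pvLoopC]
    rw [pvLoopD_none t a b c _ (fun d hd => by
      rw [PySem.List.mem_pyRange_one] at hd
      exact h c List.mem_cons_self d hd.1 hd.2)]
    exact ih fun x hx => h x (List.mem_cons_of_mem _ hx)

lemma pvLoopB_none (t a : Int) (bs : List Int)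
    (h : ∀ b ∈ bs, ∀ c d, b + 1 ≤ c → c < 9 → c + 1 ≤ d → d < 10 → a + b + c + d ≠ t) :
    pvLoopB t a bs = none := by
  induction bs with
  | nil => rfl
  | cons b bs ih =>
    simp only [pvLoopB]
    rw [pvLoopC_none t a b _ (fun c hc d hd1 hd2 => by
      rw [PySem.List.mem_pyRange_one] at hc
      exact h b List.mem_cons_self c d hc.1 hc.2 hd1 hd2)]
    exact ih fun x hx => h x (List.mem_cons_of_mem _ hx)

lemma pvLoopA_none (t : Int) (as_ : List Int)
    (h : ∀ a ∈ as_, ∀ b c d, a + 1 ≤ b → b < 8 → b + 1 ≤ c → c < 9 → c + 1 ≤ d → d < 10 →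
      a + b + c + d ≠ t) : pvLoopA t as_ = none := by
  induction as_ with
  | nil => rfl
  | cons a as_ ih =>
    simp only [pvLoopA]
    rw [pvLoopB_none t a _ (fun b hb c d hc1 hc2 hd1 hd2 => by
      rw [PySem.List.mem_pyRange_one] at hb
      exact h a List.mem_cons_self b c d hb.1 hb.2 hc1 hc2 hd1 hd2)]
    exact ih fun x hx => h x (List.mem_cons_of_mem _ hx)

lemma sum_four_digits_out_of_range (t : Int) (h : t < 10 ∨ 30 < t) :
    sum_four_digits t = "" := by
  unfold sum_four_digits
  rw [pvLoopA_none t _ (fun a ha b c d hb1 hb2 hc1 hc2 hd1 hd2 => by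
    rw [PySem.List.mem_pyRange_one] at ha
    omega)]
  rfl

-- ===== VERDICT (by name: the statement is the Claim_ definition above) =====
theorem sum_four_digits_spec : Claim_equal_sum_four_digits := by
  intro t _
  unfold Spec_sum_four_digits
  by_cases h : 10 ≤ t ∧ t ≤ 30
  · obtain ⟨h1, h2⟩ := h
    interval_cases t <;> decide
  · rw [sum_four_digits_out_of_range t (by omega)]
    unfold sum_four_digits_alt
    rw [if_pos (by omega)]
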